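-- pv_equiv track=rewrite | github.com/rkeeves/munchausen | src/e08_munchausen_property.py | list_munchausens_of_decimal_places
-- ===== SOURCE A (Python) =====
-- CACHE = [0] + list(x ** x for x in range(1, 10))
--
-- def is_munchausen(digit_counts, pow_sum):
--     for digit_ch in str(pow_sum):
--         digit = int(digit_ch)
--         digit_counts[digit] -= 1
--     for digit_count in digit_counts:
--         if digit_count != 0:
--             return False
--     return True
--
-- def compute_pow_sum(digit_counts):
--     return sum(
--         digit_count * CACHE[digit] for digit, digit_count in enumerate(digit_counts)
--     )
--
-- def list_munchausens_of_decimal_places(decimal_places):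
--     ret = []
--
--     if decimal_places < 1:
--         return ret
--
--     def assign_count(digit_counts, remaining_count):
--         if len(digit_counts) == 10:
--             pow_sum = compute_pow_sum(digit_counts)
--             if is_munchausen(digit_counts, pow_sum):
--                 ret.append(pow_sum)
--             return
--         from_num = 0
--         if len(digit_counts) == 9:
--             from_num = remaining_count
--         for chosen_count in range(from_num, remaining_count + 1):
--             assign_count(digit_counts + [chosen_count], remaining_count - chosen_count)
--
--     assign_count([], decimal_places)
--     return ret
-- ===== SOURCE B (Python) =====
-- # B: stars-and-bars enumeration — each 9-subset of bar positions in
-- # range(decimal_places + 9), generated in lexicographic order, decodes to one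
-- # digit-count tuple; the Munchausen check builds the digit-occurrence profile
-- # of pow_sum and compares lists (no mutation of the candidate counts).
--
-- CACHE = [0] + list(x ** x for x in range(1, 10))
--
-- def _combinations9(items, k):
--     # lazily yields all k-subsets of items, in lexicographic order of positions
--     if k == 0:
--         yield []
--         return
--     if len(items) < k:
--         return
--     first, rest = items[0], items[1:]
--     for c in _combinations9(rest, k - 1):
--         yield [first] + c
--     yield from _combinations9(rest, k)
--
-- def list_munchausens_of_decimal_places(decimal_places):
--     if decimal_places < 1:
--         return []
--     ret = []
--     for bars in _combinations9(list(range(decimal_places + 9)), 9):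
--         counts = []
--         prev = -1
--         for b in bars:
--             counts.append(b - prev - 1)
--             prev = b
--         counts.append(decimal_places + 8 - bars[8])
--         pow_sum = sum(c * CACHE[d] for d, c in enumerate(counts))
--         occ = [0] * 10
--         for ch in str(pow_sum):
--             occ[int(ch)] += 1
--         if counts == occ:
--             ret.append(pow_sum)
--     return ret
-- ===== Notes on version B (the rewrite author's own statement) =====
-- stated objective: alternative
-- what changed: Replaces A's recursive count-assignment (DFS appending to a closed-over list, with a mutating decrement-and-scan Munchausen check) by a stars-and-bars enumeration: every 9-subset of bar positions in range(n+9), generated in lexicographic order, is decoded into a digit-count tuple, and the check compares the counts against a freshly built digit-occurrence profile of pow_sum.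
import Mathlib
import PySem

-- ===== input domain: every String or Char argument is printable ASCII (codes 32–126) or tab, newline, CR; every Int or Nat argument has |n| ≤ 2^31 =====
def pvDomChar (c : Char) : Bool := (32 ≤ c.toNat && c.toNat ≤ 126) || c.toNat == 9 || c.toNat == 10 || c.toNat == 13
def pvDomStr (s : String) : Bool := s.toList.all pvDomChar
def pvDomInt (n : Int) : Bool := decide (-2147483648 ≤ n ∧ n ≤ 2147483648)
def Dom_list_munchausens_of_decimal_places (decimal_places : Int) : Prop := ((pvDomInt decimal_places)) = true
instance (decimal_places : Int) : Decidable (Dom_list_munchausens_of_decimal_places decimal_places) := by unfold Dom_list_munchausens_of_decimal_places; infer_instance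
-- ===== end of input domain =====

-- B replaces A's recursive count-assignment by a lexicographic stars-and-bars enumeration of
-- bar positions, decoded into digit-count tuples, with a non-mutating occurrence-profile check
-- (objective: alternative; same asymptotic cost).

-- ===== PORT A =====

-- CACHE = [0] + list(x ** x for x in range(1, 10))   (shared by both Pythons)
def pvCACHE : List Int := [0] ++ (PySem.List.pyRange 1 10 1).map (fun x => x ^ x.toNat)

-- int(digit_ch): exact on the digit characters that str() of a nonnegative int produces
def pvDigitVal (c : Char) : Int := (c.toNat : Int) - 48

def isMunchausen (digit_counts : List Int) (pow_sum : Int) : Bool :=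
  -- for digit_ch in str(pow_sum): digit_counts[int(digit_ch)] -= 1
  let dc := (PySem.Int.toChars pow_sum).foldl
    (fun dc ch => PySem.List.pySetD dc (pvDigitVal ch) (PySem.List.pyGetD dc (pvDigitVal ch) 0 - 1))
    digit_counts
  -- for digit_count in digit_counts: if digit_count != 0: return False / return True
  dc.all (fun x => x == 0)

def computePowSum (digit_counts : List Int) : Int :=
  ((PySem.List.enumerate digit_counts 0).map (fun p => p.2 * PySem.List.pyGetD pvCACHE p.1 0)).sum

-- assign_count; the recursion depth is 10 - len(digit_counts), so fuel 10 suffices and the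
-- fuel-0 branch is unreachable from the top-level call
def assignCount (fuel : Nat) (digit_counts : List Int) (remaining : Int) : List Int :=
  if digit_counts.length == 10 then
    let pow_sum := computePowSum digit_counts
    if isMunchausen digit_counts pow_sum then [pow_sum] else []
  else
    match fuel with
    | 0 => []
    | fuel' + 1 =>
      let from_num : Int := if digit_counts.length == 9 then remaining else 0
      (PySem.List.pyRange from_num (remaining + 1) 1).flatMap
        (fun chosen => assignCount fuel' (digit_counts ++ [chosen]) (remaining - chosen))

def list_munchausens_of_decimal_places (decimal_places : Int) : List Int :=
  if decimal_places < 1 then [] else assignCount 10 [] decimal_places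

-- ===== PORT B =====

-- _combinations9(items, k): all k-subsets, in lexicographic order of positions
-- (a Python generator; ported as the list of its yields, in yield order)
def combinations9 : List Int → Nat → List (List Int)
  | _, 0 => [[]]
  | items, k + 1 =>
    if items.length < k + 1 then []
    else
      match items with
      | [] => []  -- unreachable: [] has length 0 < k + 1
      | x :: xs => ((combinations9 xs k).map (fun c => x :: c)) ++ combinations9 xs (k + 1)

-- the counts/prev loop plus the final append of decimal_places + 8 - bars[8]
def altDecode (decimal_places : Int) (bars : List Int) : List Int :=
  let st := bars.foldl (fun (st : List Int × Int) b => (st.1 ++ [b - st.2 - 1], b))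
    (([] : List Int), (-1 : Int))
  st.1 ++ [decimal_places + 8 - PySem.List.pyGetD bars 8 0]

-- occ = [0]*10; for ch in str(pow_sum): occ[int(ch)] += 1; counts == occ
def altCheck (counts : List Int) (pow_sum : Int) : Bool :=
  let occ := (PySem.Int.toChars pow_sum).foldl
    (fun occ ch => PySem.List.pySetD occ (pvDigitVal ch) (PySem.List.pyGetD occ (pvDigitVal ch) 0 + 1))
    (List.replicate 10 (0 : Int))
  counts == occ

def list_munchausens_of_decimal_places_alt (decimal_places : Int) : List Int :=
  if decimal_places < 1 then [] else
    (combinations9 (PySem.List.pyRange 0 (decimal_places + 9) 1) 9).flatMap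
      (fun bars =>
        let counts := altDecode decimal_places bars
        let pow_sum := ((PySem.List.enumerate counts 0).map
          (fun p => p.2 * PySem.List.pyGetD pvCACHE p.1 0)).sum
        if altCheck counts pow_sum then [pow_sum] else [])

-- ===== PRECONDITION & SPEC =====
def Spec_list_munchausens_of_decimal_places (decimal_places : Int) (out : List Int) : Prop := out = list_munchausens_of_decimal_places_alt decimal_places
instance (decimal_places : Int) (out : List Int) : Decidable (Spec_list_munchausens_of_decimal_places decimal_places out) := by unfold Spec_list_munchausens_of_decimal_places; infer_instance

-- ===== CLAIM (what is proved, stated in full; the proofs are below) =====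
def Claim_equal_list_munchausens_of_decimal_places : Prop := ∀ (decimal_places : Int), Dom_list_munchausens_of_decimal_places decimal_places → Spec_list_munchausens_of_decimal_places decimal_places (list_munchausens_of_decimal_places decimal_places)

-- ===== LEMMAS AND PROOFS =====

-- the leaf computation shared by both enumerations
def leafA (counts : List Int) : List Int :=
  if isMunchausen counts (computePowSum counts) then [computePowSum counts] else []

def leafB (counts : List Int) : List Int :=
  if altCheck counts (computePowSum counts) then [computePowSum counts] else []

-- the compositions of n into 10 digit counts, in A's (lexicographic) enumeration order;
-- the last count is forced
def comps : Nat → Int → List (List Int)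
  | 0, n => [[n]]
  | k + 1, n => (PySem.List.pyRange 0 (n + 1) 1).flatMap
      (fun i => (comps k (n - i)).map (fun cs => i :: cs))

def gapsFrom : Int → List Int → List Int
  | _, [] => []
  | p, b :: bs => (b - p) :: gapsFrom (b + 1) bs

def decodeG : Int → Int → List Int → List Int
  | _, rem, [] => [rem]
  | p, rem, b :: bs => (b - p) :: decodeG (b + 1) (rem - (b - p)) bs

def bump : List Int → List Int
  | [] => []
  | c :: cs => (c + 1) :: cs

theorem combinations9_eq_nil_of_length_lt : ∀ (items : List Int) (k : Nat),
    items.length < k → combinations9 items k = [] := by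
  intro items k hk
  match items, k, hk with
  | [], k + 1, hk => simp [combinations9]
  | x :: xs, k + 1, hk =>
    simp only [combinations9]
    rw [if_pos hk]

theorem combinations9_cons (x : Int) (xs : List Int) (k : Nat) (h : ¬ (x :: xs).length < k + 1) :
    combinations9 (x :: xs) (k + 1)
      = ((combinations9 xs k).map (fun c => x :: c)) ++ combinations9 xs (k + 1) := by
  simp only [combinations9]
  rw [if_neg h]

theorem length_of_mem_combinations9 : ∀ (items : List Int) (k : Nat) (cs : List Int),
    cs ∈ combinations9 items k → cs.length = k := by
  intro items
  induction items with
  | nil =>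
    intro k cs hcs
    match k with
    | 0 => simp [combinations9] at hcs; simp [hcs]
    | k + 1 =>
      rw [combinations9_eq_nil_of_length_lt [] (k + 1) (by simp)] at hcs
      simp at hcs
  | cons x xs ih =>
    intro k cs hcs
    match k with
    | 0 => simp [combinations9] at hcs; simp [hcs]
    | k + 1 =>
      by_cases hlen : (x :: xs).length < k + 1
      · rw [combinations9_eq_nil_of_length_lt _ _ hlen] at hcs
        simp at hcs
      · rw [combinations9_cons x xs k hlen] at hcs
        simp only [List.mem_append, List.mem_map] at hcs
        rcases hcs with ⟨c, hc, rfl⟩ | hcs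
        · simp [ih k c hc]
        · exact ih (k + 1) cs hcs

theorem decodeG_shift (bs : List Int) (p rem : Int) (h : bs ≠ []) :
    decodeG p (rem + 1) bs = bump (decodeG (p + 1) rem bs) := by
  match bs with
  | b :: bs' =>
    simp only [decodeG, bump, List.cons.injEq]
    refine ⟨by ring, ?_⟩
    have e : rem + 1 - (b - p) = rem - (b - (p + 1)) := by ring
    rw [e]

-- the stars-and-bars bijection: decoding the k-subsets of the positions
-- [p, p + m + k) in lexicographic order yields exactly A's composition order
theorem core_decode : ∀ (k m : Nat) (p : Int),
    (combinations9 (PySem.List.pyRange p (p + (m : Int) + (k : Int)) 1) k).map (decodeG p (m : Int))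
      = comps k (m : Int) := by
  intro k
  induction k with
  | zero =>
    intro m p
    simp [combinations9, decodeG, comps]
  | succ k ihk =>
    have step1 : ∀ (M : Nat) (p : Int),
        (combinations9 (PySem.List.pyRange (p + 1) (p + (M : Int) + ((k + 1 : Nat) : Int)) 1) k).map
          (fun c => decodeG p (M : Int) (p :: c))
        = (comps k (M : Int)).map (fun cs => (0 : Int) :: cs) := by
      intro M p
      rw [show p + (M : Int) + ((k + 1 : Nat) : Int) = (p + 1) + (M : Int) + (k : Int) by push_cast; ring]
      rw [show (fun c => decodeG p (M : Int) (p :: c))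
          = (fun c => (0 : Int) :: decodeG (p + 1) (M : Int) c) from funext (fun c => by simp [decodeG])]
      rw [show (fun c => (0 : Int) :: decodeG (p + 1) (M : Int) c)
          = ((fun cs => (0 : Int) :: cs) ∘ (decodeG (p + 1) (M : Int))) from rfl]
      rw [← List.map_map, ihk M (p + 1)]
    intro m
    induction m with
    | zero =>
      intro p
      rw [PySem.List.pyRange_one_cons (show p < p + ((0 : Nat) : Int) + ((k + 1 : Nat) : Int) by push_cast; omega)]
      rw [combinations9_cons p _ k
        (by rw [List.length_cons, PySem.List.length_pyRange_one]; push_cast; omega)]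
      simp only [List.map_append, List.map_map, Function.comp_def]
      rw [combinations9_eq_nil_of_length_lt _ (k + 1)
        (by rw [PySem.List.length_pyRange_one]; push_cast; omega)]
      rw [step1 0 p]
      simp only [List.map_nil, List.append_nil]
      conv_rhs => rw [comps]
      rw [show PySem.List.pyRange 0 (((0 : Nat) : Int) + 1) 1 = [0] by
        simpa using PySem.List.pyRange_one_singleton 0]
      simp
    | succ m ihm =>
      intro p
      rw [PySem.List.pyRange_one_cons (show p < p + ((m + 1 : Nat) : Int) + ((k + 1 : Nat) : Int) by push_cast; omega)]
      rw [combinations9_cons p _ k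
        (by rw [List.length_cons, PySem.List.length_pyRange_one]; push_cast; omega)]
      simp only [List.map_append, List.map_map, Function.comp_def]
      rw [step1 (m + 1) p]
      have part2 : (combinations9 (PySem.List.pyRange (p + 1) (p + ((m + 1 : Nat) : Int) + ((k + 1 : Nat) : Int)) 1) (k + 1)).map
            (decodeG p ((m + 1 : Nat) : Int))
          = (comps (k + 1) ((m : Nat) : Int)).map bump := by
        rw [show p + ((m + 1 : Nat) : Int) + ((k + 1 : Nat) : Int)
            = (p + 1) + ((m : Nat) : Int) + ((k + 1 : Nat) : Int) by push_cast; ring]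
        calc (combinations9 (PySem.List.pyRange (p + 1) ((p + 1) + ((m : Nat) : Int) + ((k + 1 : Nat) : Int)) 1) (k + 1)).map
                (decodeG p ((m + 1 : Nat) : Int))
            = (combinations9 (PySem.List.pyRange (p + 1) ((p + 1) + ((m : Nat) : Int) + ((k + 1 : Nat) : Int)) 1) (k + 1)).map
                (fun bs => bump (decodeG (p + 1) ((m : Nat) : Int) bs)) := by
              refine List.map_congr_left (fun bs hbs => ?_)
              have hne : bs ≠ [] := by
                have hl := length_of_mem_combinations9 _ _ _ hbs
                intro hn; rw [hn] at hl; simp at hl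
              rw [show ((m + 1 : Nat) : Int) = ((m : Nat) : Int) + 1 by push_cast; ring]
              exact decodeG_shift bs p ((m : Nat) : Int) hne
          _ = ((combinations9 (PySem.List.pyRange (p + 1) ((p + 1) + ((m : Nat) : Int) + ((k + 1 : Nat) : Int)) 1) (k + 1)).map
                (decodeG (p + 1) ((m : Nat) : Int))).map bump := by
              rw [List.map_map]; rfl
          _ = (comps (k + 1) ((m : Nat) : Int)).map bump := by rw [ihm (p + 1)]
      rw [part2]
      -- assemble the right-hand side
      conv_rhs => rw [comps]
      rw [PySem.List.pyRange_one_cons (show (0 : Int) < ((m + 1 : Nat) : Int) + 1 by push_cast; omega),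
        List.flatMap_cons, sub_zero]
      congr 1
      -- flatMap over [1 .. m+1] is the bump of comps (k+1) m
      conv_lhs => rw [show comps (k + 1) ((m : Nat) : Int)
          = (PySem.List.pyRange 0 (((m : Nat) : Int) + 1) 1).flatMap
              (fun i => (comps k (((m : Nat) : Int) - i)).map (fun cs => i :: cs)) from by rw [comps]]
      rw [PySem.List.pyRange_one 0 (((m : Nat) : Int) + 1),
        PySem.List.pyRange_one ((0 : Int) + 1) (((m + 1 : Nat) : Int) + 1)]
      rw [show ((((m : Nat) : Int) + 1 - 0)).toNat = m + 1 by omega]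
      rw [show ((((m + 1 : Nat) : Int) + 1 - ((0 : Int) + 1))).toNat = m + 1 by push_cast; omega]
      rw [List.flatMap_map, List.flatMap_map, List.map_flatMap]
      refine List.flatMap_congr (fun t _ => ?_)
      rw [List.map_map]
      rw [show ((m + 1 : Nat) : Int) - ((0 : Int) + 1 + (t : Int)) = ((m : Nat) : Int) - (0 + (t : Int)) by push_cast; ring]
      refine List.map_congr_left (fun cs _ => ?_)
      simp only [Function.comp_def, bump, List.cons.injEq]
      exact ⟨by omega, trivial⟩

-- === B-side decoding ===

theorem foldl_gaps : ∀ (bs acc : List Int) (p : Int),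
    (bs.foldl (fun (st : List Int × Int) b => (st.1 ++ [b - st.2 - 1], b)) (acc, p - 1)).1
      = acc ++ gapsFrom p bs := by
  intro bs
  induction bs with
  | nil => intro acc p; simp [gapsFrom]
  | cons b bs ih =>
    intro acc p
    simp only [List.foldl_cons, gapsFrom]
    have e : b - (p - 1) - 1 = b - p := by ring
    rw [e]
    have e2 : (acc ++ [b - p], b) = (acc ++ [b - p], (b + 1) - 1) := by norm_num
    rw [e2, ih (acc ++ [b - p]) (b + 1)]
    simp

theorem decodeG_eq_gaps : ∀ (bs : List Int) (p rem : Int),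
    decodeG p rem bs = gapsFrom p bs ++ [rem - (gapsFrom p bs).sum] := by
  intro bs
  induction bs with
  | nil => intro p rem; simp [decodeG, gapsFrom]
  | cons b bs ih =>
    intro p rem
    simp only [decodeG, gapsFrom, ih (b + 1) (rem - (b - p)), List.sum_cons, List.cons_append]
    congr 2
    ring

theorem gaps_sum : ∀ (bs : List Int) (p : Int) (h : bs ≠ []),
    (gapsFrom p bs).sum = bs.getLast h - p - ((bs.length : Int) - 1) := by
  intro bs
  induction bs with
  | nil => intro p h; exact absurd rfl h
  | cons b bs ih =>
    intro p h
    match bs, ih with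
    | [], _ =>
      simp only [gapsFrom, List.sum_cons, List.sum_nil, List.getLast_singleton,
        List.length_cons, List.length_nil]
      push_cast
      ring
    | b' :: bs', ih =>
      have htl : (b' :: bs') ≠ [] := by simp
      rw [List.getLast_cons htl]
      rw [show gapsFrom p (b :: b' :: bs') = (b - p) :: gapsFrom (b + 1) (b' :: bs') from rfl,
        List.sum_cons, ih (b + 1) htl]
      simp only [List.length_cons]
      push_cast
      ring

theorem altDecode_eq (n : Int) (bars : List Int) (h : bars.length = 9) :
    altDecode n bars = decodeG 0 n bars := by
  have hne : bars ≠ [] := by intro hn; rw [hn] at h; simp at h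
  have hget : PySem.List.pyGetD bars 8 0 = bars.getLast hne := by
    have h8 : ((8 : Int)) < (bars.length : Int) := by omega
    rw [PySem.List.pyGetD_eq_getElem bars 0 (by norm_num) h8]
    rw [List.getLast_eq_getElem]
    congr 1
    omega
  show (bars.foldl (fun (st : List Int × Int) b => (st.1 ++ [b - st.2 - 1], b)) ([], -1)).1
      ++ [n + 8 - PySem.List.pyGetD bars 8 0] = decodeG 0 n bars
  have e : (([] : List Int), (-1 : Int)) = (([] : List Int), (0 : Int) - 1) := by norm_num
  rw [e, foldl_gaps bars [] 0, hget, decodeG_eq_gaps bars 0 n, List.nil_append]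
  congr 2
  rw [gaps_sum bars 0 hne, h]
  push_cast
  ring

-- === A-side enumeration ===

theorem assign_eq : ∀ (k : Nat) (dc : List Int) (rem : Int), dc.length + k = 9 →
    assignCount (k + 1) dc rem = (comps k rem).flatMap (fun suf => leafA (dc ++ suf)) := by
  intro k
  induction k with
  | zero =>
    intro dc rem h
    have h9 : dc.length = 9 := by omega
    show assignCount 1 dc rem = _
    rw [assignCount]
    rw [if_neg (by simp [h9])]
    simp only [h9]
    rw [if_pos (by simp)]
    rw [PySem.List.pyRange_one_singleton rem]
    simp only [List.flatMap_cons, List.flatMap_nil, List.append_nil]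
    rw [assignCount]
    rw [if_pos (by simp [h9])]
    simp [comps, leafA]
  | succ k ih =>
    intro dc rem h
    rw [assignCount]
    rw [if_neg (by simp; omega)]
    simp only
    rw [if_neg (by simp; omega)]
    have hlhs : ∀ i : Int, assignCount (k + 1) (dc ++ [i]) (rem - i)
        = (comps k (rem - i)).flatMap (fun suf => leafA ((dc ++ [i]) ++ suf)) := by
      intro i
      exact ih (dc ++ [i]) (rem - i) (by simp; omega)
    show (PySem.List.pyRange 0 (rem + 1) 1).flatMap
        (fun chosen => assignCount (k + 1) (dc ++ [chosen]) (rem - chosen)) = _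
    rw [show comps (k + 1) rem = (PySem.List.pyRange 0 (rem + 1) 1).flatMap
        (fun i => (comps k (rem - i)).map (fun cs => i :: cs)) from rfl]
    rw [List.flatMap_assoc]
    refine List.flatMap_congr (fun i _ => ?_)
    rw [hlhs i]
    rw [List.flatMap_def, List.flatMap_def, List.map_map]
    congr 1
    refine List.map_congr_left (fun suf _ => ?_)
    simp

-- === comps members ===

theorem mem_comps : ∀ (k : Nat) (n : Int) (cs : List Int), 0 ≤ n → cs ∈ comps k n →
    cs.length = k + 1 ∧ ∀ x ∈ cs, 0 ≤ x := by
  intro k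
  induction k with
  | zero =>
    intro n cs hn hcs
    simp [comps] at hcs
    subst hcs
    constructor
    · rfl
    · intro x hx; simp at hx; omega
  | succ k ih =>
    intro n cs hn hcs
    simp only [comps, List.mem_flatMap, List.mem_map] at hcs
    obtain ⟨i, hi, c, hc, rfl⟩ := hcs
    rw [PySem.List.mem_pyRange_one] at hi
    have := ih (n - i) c (by omega) hc
    constructor
    · simp [this.1]
    · intro x hx
      rcases List.mem_cons.mp hx with rfl | hx
      · omega
      · exact this.2 x hx

-- === the two Munchausen checks agree ===

theorem digitChar_digit (k : Nat) (hk : k < 10) :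
    48 ≤ (Nat.digitChar k).toNat ∧ (Nat.digitChar k).toNat ≤ 57 := by
  interval_cases k <;> decide

theorem toDigitsCore_digits : ∀ (fuel n : Nat) (acc : List Char),
    (∀ c ∈ acc, 48 ≤ c.toNat ∧ c.toNat ≤ 57) →
    ∀ c ∈ Nat.toDigitsCore 10 fuel n acc, 48 ≤ c.toNat ∧ c.toNat ≤ 57 := by
  intro fuel
  induction fuel with
  | zero => intro n acc hacc c hc; exact hacc c hc
  | succ fuel ih =>
    intro n acc hacc c hc
    rw [Nat.toDigitsCore] at hc
    have hd : ∀ c' ∈ (Nat.digitChar (n % 10)) :: acc, 48 ≤ c'.toNat ∧ c'.toNat ≤ 57 := by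
      intro c' hc'
      rcases List.mem_cons.mp hc' with rfl | hc'
      · exact digitChar_digit _ (Nat.mod_lt _ (by norm_num))
      · exact hacc c' hc'
    by_cases hz : n / 10 = 0
    · rw [if_pos hz] at hc
      exact hd c hc
    · rw [if_neg hz] at hc
      exact ih (n / 10) _ hd c hc

theorem toChars_digits (z : Int) (hz : 0 ≤ z) :
    ∀ c ∈ PySem.Int.toChars z, 48 ≤ c.toNat ∧ c.toNat ≤ 57 := by
  rw [PySem.Int.toChars, if_neg (by omega)]
  rw [Nat.toDigits]
  exact toDigitsCore_digits _ _ [] (by simp)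

def occCount (cs : List Char) (j : Nat) : Nat := cs.countP (fun c => c.toNat == j + 48)

theorem map_getD_range (xs : List Int) (h : xs.length = 10) :
    (List.range 10).map (fun j => xs.getD j 0) = xs := by
  apply List.ext_getElem
  · simp [h]
  · intro i h1 h2
    simp only [List.getElem_map, List.getElem_range]
    exact List.getD_eq_getElem xs 0 h2

theorem foldUpd (δ : Int) : ∀ (cs : List Char) (xs : List Int), xs.length = 10 →
    (∀ c ∈ cs, 48 ≤ c.toNat ∧ c.toNat ≤ 57) →
    cs.foldl (fun l ch => PySem.List.pySetD l (pvDigitVal ch) (PySem.List.pyGetD l (pvDigitVal ch) 0 + δ)) xs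
      = (List.range 10).map (fun j => xs.getD j 0 + δ * (occCount cs j : Int)) := by
  intro cs
  induction cs with
  | nil =>
    intro xs h _
    simp only [List.foldl_nil, occCount, List.countP_nil, Nat.cast_zero, mul_zero, add_zero]
    exact (map_getD_range xs h).symm
  | cons c cs ih =>
    intro xs h hd
    obtain ⟨h48, h57⟩ := hd c (by simp)
    set d : Nat := c.toNat - 48 with hdd
    have hd10 : d < 10 := by omega
    have hcast : pvDigitVal c = (d : Int) := by
      rw [pvDigitVal]; omega
    rw [List.foldl_cons, hcast, PySem.List.pySetD_natCast, PySem.List.pyGetD_natCast]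
    rw [ih (xs.set d (xs.getD d 0 + δ)) (by simp [h]) (fun c' hc' => hd c' (by simp [hc']))]
    refine List.map_congr_left (fun j hj => ?_)
    rw [List.mem_range] at hj
    have hset : (xs.set d (xs.getD d 0 + δ)).getD j 0
        = if d = j then xs.getD d 0 + δ else xs.getD j 0 := by
      have hjlen : j < (xs.set d (xs.getD d 0 + δ)).length := by simp [h]; omega
      rw [List.getD_eq_getElem _ 0 hjlen, List.getElem_set]
      split
      · rfl
      · exact (List.getD_eq_getElem xs 0 (by omega)).symm
    have hocc : occCount (c :: cs) j = occCount cs j + if d = j then 1 else 0 := by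
      rw [occCount, occCount, List.countP_cons]
      congr 1
      by_cases hjd : d = j
      · rw [if_pos hjd, if_pos (by simp; omega)]
      · rw [if_neg hjd, if_neg (by simp; omega)]
    rw [hset, hocc]
    by_cases hjd : d = j
    · rw [if_pos hjd, if_pos hjd]
      subst hjd
      push_cast
      ring
    · rw [if_neg hjd, if_neg hjd]
      push_cast
      ring

theorem check_eq (counts : List Int) (pow : Int) (h : counts.length = 10) (hp : 0 ≤ pow) :
    isMunchausen counts pow = altCheck counts pow := by
  have hdig := toChars_digits pow hp
  rw [Bool.eq_iff_iff]
  rw [isMunchausen, altCheck]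
  have hA : (PySem.Int.toChars pow).foldl
      (fun dc ch => PySem.List.pySetD dc (pvDigitVal ch) (PySem.List.pyGetD dc (pvDigitVal ch) 0 - 1)) counts
      = (List.range 10).map (fun j => counts.getD j 0 + (-1) * (occCount (PySem.Int.toChars pow) j : Int)) := by
    rw [← foldUpd (-1) (PySem.Int.toChars pow) counts h hdig]
    simp only [sub_eq_add_neg]
  have hB : (PySem.Int.toChars pow).foldl
      (fun occ ch => PySem.List.pySetD occ (pvDigitVal ch) (PySem.List.pyGetD occ (pvDigitVal ch) 0 + 1))
      (List.replicate 10 (0 : Int))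
      = (List.range 10).map (fun j => (occCount (PySem.Int.toChars pow) j : Int)) := by
    rw [foldUpd 1 (PySem.Int.toChars pow) (List.replicate 10 (0 : Int)) (by simp) hdig]
    refine List.map_congr_left (fun j hj => ?_)
    rw [List.mem_range] at hj
    rw [List.getD_replicate _ hj]
    ring
  rw [hA, hB]
  simp only [List.all_map, List.all_eq_true, List.mem_range, Function.comp, beq_iff_eq]
  constructor
  · intro hz
    rw [← map_getD_range counts h]
    refine List.map_congr_left (fun j hj => ?_)
    rw [List.mem_range] at hj
    have := hz j hj
    omega
  · intro he j hj
    have : counts.getD j 0 = (occCount (PySem.Int.toChars pow) j : Int) := by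
      conv_lhs => rw [he]
      have hjlen : j < ((List.range 10).map (fun j => (occCount (PySem.Int.toChars pow) j : Int))).length := by
        simp [hj]
      rw [List.getD_eq_getElem _ 0 hjlen]
      simp
    omega

-- === pow_sum is nonnegative on enumerated counts ===

theorem cache_nonneg (i : Int) : 0 ≤ PySem.List.pyGetD pvCACHE i 0 := by
  rcases hg : PySem.List.pyGet? pvCACHE i with _ | v
  · rw [PySem.List.pyGetD_of_none _ _ _ hg]
  · have hmem := PySem.List.mem_of_pyGet?_eq_some pvCACHE hg
    have hall : ∀ x ∈ pvCACHE, 0 ≤ x := by decide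
    have hval : PySem.List.pyGetD pvCACHE i 0 = v := by
      simp [PySem.List.pyGetD, hg]
    rw [hval]
    exact hall v hmem

theorem powSum_tail_nonneg : ∀ (dc : List Int) (s : Int), (∀ x ∈ dc, 0 ≤ x) →
    0 ≤ ((PySem.List.enumerate dc s).map (fun p => p.2 * PySem.List.pyGetD pvCACHE p.1 0)).sum := by
  intro dc
  induction dc with
  | nil => intro s _; simp [PySem.List.enumerate_nil]
  | cons x xs ih =>
    intro s hx
    rw [PySem.List.enumerate_cons]
    simp only [List.map_cons, List.sum_cons]
    have h1 : 0 ≤ x * PySem.List.pyGetD pvCACHE s 0 :=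
      mul_nonneg (hx x (by simp)) (cache_nonneg s)
    have h2 := ih (s + 1) (fun y hy => hx y (by simp [hy]))
    omega

theorem powSum_nonneg (dc : List Int) (h : ∀ x ∈ dc, 0 ≤ x) : 0 ≤ computePowSum dc :=
  powSum_tail_nonneg dc 0 h

-- ===== VERDICT (by name: the statement is the Claim_ definition above) =====
theorem list_munchausens_of_decimal_places_spec : Claim_equal_list_munchausens_of_decimal_places := by
  intro n _
  unfold Spec_list_munchausens_of_decimal_places
  by_cases hlt : n < 1
  · rw [list_munchausens_of_decimal_places, list_munchausens_of_decimal_places_alt,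
      if_pos hlt, if_pos hlt]
  · obtain ⟨N, rfl⟩ : ∃ M : Nat, n = (M : Int) := ⟨n.toNat, by omega⟩
    -- A side
    have hA : list_munchausens_of_decimal_places (N : Int) = (comps 9 (N : Int)).flatMap leafA := by
      rw [list_munchausens_of_decimal_places, if_neg hlt]
      rw [show assignCount 10 [] (N : Int) = assignCount (9 + 1) [] (N : Int) from rfl,
        assign_eq 9 [] (N : Int) (by simp)]
      refine List.flatMap_congr (fun suf _ => ?_)
      rw [List.nil_append]
    -- B side
    have hB : list_munchausens_of_decimal_places_alt (N : Int)
        = (comps 9 (N : Int)).flatMap leafB := by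
      rw [list_munchausens_of_decimal_places_alt, if_neg hlt]
      have hbody : ∀ bars ∈ combinations9 (PySem.List.pyRange 0 ((N : Int) + 9) 1) 9,
          (fun bars =>
            let counts := altDecode (N : Int) bars
            let pow_sum := ((PySem.List.enumerate counts 0).map
              (fun p => p.2 * PySem.List.pyGetD pvCACHE p.1 0)).sum
            if altCheck counts pow_sum then [pow_sum] else []) bars
          = leafB (decodeG 0 (N : Int) bars) := by
        intro bars hbars
        have h9 := length_of_mem_combinations9 _ _ _ hbars
        simp only
        rw [altDecode_eq (N : Int) bars h9]
        rfl
      rw [List.flatMap_congr hbody]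
      rw [show (N : Int) + 9 = (0 : Int) + (N : Int) + ((9 : Nat) : Int) by push_cast; ring]
      calc (combinations9 (PySem.List.pyRange 0 ((0 : Int) + (N : Int) + ((9 : Nat) : Int)) 1) 9).flatMap
              (fun bars => leafB (decodeG 0 (N : Int) bars))
          = ((combinations9 (PySem.List.pyRange 0 ((0 : Int) + (N : Int) + ((9 : Nat) : Int)) 1) 9).map
              (decodeG 0 (N : Int))).flatMap leafB := by
            rw [List.flatMap_map]
        _ = (comps 9 (N : Int)).flatMap leafB := by rw [core_decode 9 N 0]
    rw [hA, hB]
    refine List.flatMap_congr (fun cs hcs => ?_)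
    obtain ⟨hlen, hnn⟩ := mem_comps 9 (N : Int) cs (by omega) hcs
    rw [leafA, leafB, check_eq cs (computePowSum cs) hlen (powSum_nonneg cs hnn)]
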